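-- pv_equiv track=rewrite | github.com/vince-ing/pdf_editor | archive/gui/widgets/edit_overlay.py | _abs_to_tk_index
-- ===== SOURCE A (Python) =====
-- def _abs_to_tk_index(abs_offset: int, lines: list) -> str:
--     """Convert an absolute character offset to a Tkinter line.col index."""
--     remaining = abs_offset
--     for line_num, line in enumerate(lines):
--         line_len = len(line) + 1  # +1 for newline
--         if remaining <= len(line):
--             return f"{line_num + 1}.{remaining}"
--         remaining -= line_len
--     # Clamp to end of last line
--     return f"{len(lines)}.{len(lines[-1]) if lines else 0}"
-- ===== SOURCE B (Python) =====
-- def _abs_to_tk_index(abs_offset: int, lines: list) -> str: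
--     """Convert an absolute character offset to a Tkinter line.col index.
--
--     Prefix-sum table of cumulative line-end offsets + binary search,
--     instead of A's linear subtract-and-scan loop."""
--     ends = []
--     total = 0
--     for line in lines:
--         total += len(line) + 1
--         ends.append(total)
--     lo, hi = 0, len(ends)
--     while lo < hi:
--         mid = (lo + hi) // 2
--         if ends[mid] <= abs_offset:
--             lo = mid + 1
--         else:
--             hi = mid
--     if lo < len(lines):
--         start = ends[lo - 1] if lo else 0
--         return f"{lo + 1}.{abs_offset - start}"
--     return f"{len(lines)}.{len(lines[-1]) if lines else 0}"
-- ===== Notes on version B (the rewrite author's own statement) =====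
-- stated objective: alternative
-- what changed: Replaces A's linear subtract-and-scan over the lines by precomputing a prefix table of cumulative line-end offsets and binary-searching it for the target line.
import Mathlib
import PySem

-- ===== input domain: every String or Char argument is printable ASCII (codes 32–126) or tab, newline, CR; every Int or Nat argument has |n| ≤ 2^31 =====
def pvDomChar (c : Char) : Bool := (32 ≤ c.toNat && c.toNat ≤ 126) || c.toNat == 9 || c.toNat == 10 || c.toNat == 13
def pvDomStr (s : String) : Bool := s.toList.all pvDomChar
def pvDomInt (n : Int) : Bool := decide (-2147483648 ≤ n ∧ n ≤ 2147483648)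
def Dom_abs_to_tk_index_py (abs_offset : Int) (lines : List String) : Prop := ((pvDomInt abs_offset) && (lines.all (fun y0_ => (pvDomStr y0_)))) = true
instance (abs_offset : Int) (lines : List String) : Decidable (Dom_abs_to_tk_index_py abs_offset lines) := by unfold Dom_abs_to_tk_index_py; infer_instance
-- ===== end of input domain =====

-- B replaces A's linear subtract-and-scan loop by a prefix table of cumulative
-- line-end offsets plus a binary search (objective: alternative; same result,
-- different data structure and traversal).

-- ===== PORT A =====
-- the for-loop of A: `some formatted` on early return, `none` when the loop falls through
def abs_to_tk_index_loopA (lines : List String) (remaining : Int) (lineNum : Int) : Option String :=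
  match lines with
  | [] => none
  | line :: rest =>
    if remaining ≤ PySem.Str.len line then
      some (PySem.Int.toStr (lineNum + 1) ++ "." ++ PySem.Int.toStr remaining)
    else
      abs_to_tk_index_loopA rest (remaining - (PySem.Str.len line + 1)) (lineNum + 1)

def abs_to_tk_index_py (abs_offset : Int) (lines : List String) : String :=
  match abs_to_tk_index_loopA lines abs_offset 0 with
  | some s => s
  | none =>
    PySem.Int.toStr (lines.length : Int) ++ "." ++
      PySem.Int.toStr (match lines.getLast? with | some l => PySem.Str.len l | none => 0)

-- ===== PORT B =====
-- the while-loop of B: binary search for the first index with x < ends[i]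
def abs_to_tk_index_bsearch (ends : List Int) (x : Int) (lo hi : Nat) : Nat :=
  if _h : lo < hi then
    let mid := (lo + hi) / 2
    if ends.getD mid 0 ≤ x then abs_to_tk_index_bsearch ends x (mid + 1) hi
    else abs_to_tk_index_bsearch ends x lo mid
  else lo
termination_by hi - lo
decreasing_by all_goals omega

def abs_to_tk_index_py_alt (abs_offset : Int) (lines : List String) : String :=
  -- prefix table: ends[i] = cumulative offset just past line i's newline
  let ends := (lines.foldl (fun (p : List Int × Int) line =>
    let t := p.2 + PySem.Str.len line + 1
    (p.1 ++ [t], t)) ([], 0)).1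
  let lo := abs_to_tk_index_bsearch ends abs_offset 0 ends.length
  if lo < lines.length then
    let start := if lo = 0 then 0 else ends.getD (lo - 1) 0
    PySem.Int.toStr ((lo : Int) + 1) ++ "." ++ PySem.Int.toStr (abs_offset - start)
  else
    PySem.Int.toStr (lines.length : Int) ++ "." ++
      PySem.Int.toStr (match lines.getLast? with | some l => PySem.Str.len l | none => 0)

-- ===== PRECONDITION & SPEC =====
def Spec_abs_to_tk_index_py (abs_offset : Int) (lines : List String) (out : String) : Prop := out = abs_to_tk_index_py_alt abs_offset lines
instance (abs_offset : Int) (lines : List String) (out : String) : Decidable (Spec_abs_to_tk_index_py abs_offset lines out) := by unfold Spec_abs_to_tk_index_py; infer_instance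

-- ===== CLAIM (what is proved, stated in full; the proofs are below) =====
def Claim_equal_abs_to_tk_index_py : Prop := ∀ (abs_offset : Int) (lines : List String), Dom_abs_to_tk_index_py abs_offset lines → Spec_abs_to_tk_index_py abs_offset lines (abs_to_tk_index_py abs_offset lines)

-- ===== LEMMAS AND PROOFS =====

-- proof-side recursive form of the prefix table
def endsFrom (t : Int) : List String → List Int
  | [] => []
  | l :: ls => (t + PySem.Str.len l + 1) :: endsFrom (t + PySem.Str.len l + 1) ls

-- proof-side final running total of B's foldl
def endsTotal (t : Int) : List String → Int
  | [] => t
  | l :: ls => endsTotal (t + PySem.Str.len l + 1) ls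

-- first index i with x < E[i] (E.length if none)
def idxLin (E : List Int) (x : Int) : Nat := (E.takeWhile (fun e => decide (e ≤ x))).length

lemma idxLin_nil (x : Int) : idxLin [] x = 0 := rfl

lemma idxLin_cons (e : Int) (E : List Int) (x : Int) :
    idxLin (e :: E) x = if e ≤ x then idxLin E x + 1 else 0 := by
  simp only [idxLin, List.takeWhile]
  by_cases h : e ≤ x
  · simp [h]
  · simp [h]

lemma idxLin_le (E : List Int) (x : Int) : idxLin E x ≤ E.length :=
  (List.takeWhile_sublist _).length_le

lemma idxLin_lt_of (E : List Int) (x : Int) (j : Nat) (hj : j < idxLin E x) :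
    E.getD j 0 ≤ x := by
  induction E generalizing j with
  | nil => simp [idxLin_nil] at hj
  | cons e E ih =>
    rw [idxLin_cons] at hj
    split_ifs at hj with h
    · cases j with
      | zero => simpa using h
      | succ j => simpa using ih j (by omega)
    · omega

lemma idxLin_ge_of (E : List Int) (x : Int) (h : idxLin E x < E.length) :
    x < E.getD (idxLin E x) 0 := by
  induction E with
  | nil => simp [idxLin_nil] at h
  | cons e E ih =>
    rw [idxLin_cons] at h ⊢
    by_cases he : e ≤ x
    · rw [if_pos he] at h ⊢
      simpa using ih (by simpa using h)
    · rw [if_neg he]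
      simpa using lt_of_not_ge he

lemma endsFrom_lb (t : Int) (ls : List String) : ∀ e ∈ endsFrom t ls, t < e := by
  induction ls generalizing t with
  | nil => simp [endsFrom]
  | cons l ls ih =>
    intro e he
    have hl : (0 : Int) ≤ PySem.Str.len l := by
      rw [PySem.Str.len_eq]; positivity
    rw [endsFrom, List.mem_cons] at he
    rcases he with rfl | he
    · omega
    · have := ih _ _ he; omega

lemma endsFrom_sorted (t : Int) (ls : List String) : (endsFrom t ls).Pairwise (· ≤ ·) := by
  induction ls generalizing t with
  | nil => exact List.Pairwise.nil
  | cons l ls ih =>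
    exact List.Pairwise.cons (fun e he => le_of_lt (endsFrom_lb _ _ e he)) (ih _)

-- getD monotonicity for a pairwise-≤ list
lemma getD_mono_of_sorted (E : List Int) (hE : E.Pairwise (· ≤ ·)) (i j : Nat)
    (hij : i ≤ j) (hj : j < E.length) : E.getD i 0 ≤ E.getD j 0 := by
  rcases eq_or_lt_of_le hij with rfl | hlt
  · exact le_refl _
  · have hi : i < E.length := lt_trans hlt hj
    rw [List.getD_eq_getElem E 0 hi, List.getD_eq_getElem E 0 hj]
    exact List.pairwise_iff_getElem.mp hE i j hi hj hlt

-- the binary search computes idxLin on a sorted list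
lemma bsearch_eq (E : List Int) (x : Int) (hE : E.Pairwise (· ≤ ·)) :
    ∀ n lo hi, hi - lo ≤ n → lo ≤ hi → hi ≤ E.length →
    lo ≤ idxLin E x → idxLin E x ≤ hi →
    abs_to_tk_index_bsearch E x lo hi = idxLin E x := by
  intro n
  induction n with
  | zero =>
    intro lo hi hn _ _ h1 h2
    unfold abs_to_tk_index_bsearch
    rw [dif_neg (by omega)]
    omega
  | succ n ih =>
    intro lo hi hn hle hhi h1 h2
    unfold abs_to_tk_index_bsearch
    by_cases hlt : lo < hi
    · rw [dif_pos hlt]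
      have hmid1 : lo ≤ (lo + hi) / 2 := by omega
      have hmid2 : (lo + hi) / 2 < hi := by omega
      by_cases hc : E.getD ((lo + hi) / 2) 0 ≤ x
      · rw [if_pos hc]
        have hidx : (lo + hi) / 2 + 1 ≤ idxLin E x := by
          by_contra hcon
          have h' : idxLin E x < E.length := by omega
          have hg := idxLin_ge_of E x h'
          have hm := getD_mono_of_sorted E hE (idxLin E x) ((lo + hi) / 2)
            (by omega) (by omega)
          omega
        exact ih ((lo + hi) / 2 + 1) hi (by omega) (by omega) hhi hidx h2
      · rw [if_neg hc]
        have hidx : idxLin E x ≤ (lo + hi) / 2 := by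
          by_contra hcon
          exact hc (idxLin_lt_of E x ((lo + hi) / 2) (by omega))
        exact ih lo ((lo + hi) / 2) (by omega) (by omega) (by omega) h1 hidx
    · rw [dif_neg hlt]; omega

lemma bsearch_eq_idxLin (E : List Int) (x : Int) (hE : E.Pairwise (· ≤ ·)) :
    abs_to_tk_index_bsearch E x 0 E.length = idxLin E x :=
  bsearch_eq E x hE E.length 0 E.length (by omega) (by omega) (le_refl _)
    (Nat.zero_le _) (idxLin_le E x)

-- B's foldl builds exactly the prefix table endsFrom
lemma foldl_ends (ls : List String) : ∀ (acc : List Int) (t : Int),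
    ls.foldl (fun (p : List Int × Int) line =>
      let u := p.2 + PySem.Str.len line + 1
      (p.1 ++ [u], u)) (acc, t) = (acc ++ endsFrom t ls, endsTotal t ls) := by
  induction ls with
  | nil => intro acc t; simp [endsFrom, endsTotal]
  | cons l ls ih =>
    intro acc t
    simp only [List.foldl_cons, endsFrom, endsTotal]
    rw [ih]
    simp

-- A's loop, characterized through idxLin over the prefix table
lemma loopA_eq (ls : List String) : ∀ (x t k : Int),
    abs_to_tk_index_loopA ls (x - t) k =
      (if idxLin (endsFrom t ls) x < ls.length then
        some (PySem.Int.toStr (k + (idxLin (endsFrom t ls) x : Int) + 1) ++ "." ++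
          PySem.Int.toStr (x - (if idxLin (endsFrom t ls) x = 0 then t
            else (endsFrom t ls).getD (idxLin (endsFrom t ls) x - 1) 0)))
      else none) := by
  induction ls with
  | nil => intro x t k; simp [abs_to_tk_index_loopA, endsFrom, idxLin_nil]
  | cons l ls ih =>
    intro x t k
    simp only [abs_to_tk_index_loopA, endsFrom, idxLin_cons]
    by_cases hle : x - t ≤ PySem.Str.len l
    · rw [if_pos hle, if_neg (by omega : ¬ t + PySem.Str.len l + 1 ≤ x)]
      simp
    · rw [if_neg hle, if_pos (by omega : t + PySem.Str.len l + 1 ≤ x)]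
      have harg : x - t - (PySem.Str.len l + 1) = x - (t + PySem.Str.len l + 1) := by ring
      rw [harg, ih x (t + PySem.Str.len l + 1) (k + 1)]
      have h1 : k + 1 + (idxLin (endsFrom (t + PySem.Str.len l + 1) ls) x : Int) + 1 =
          k + ((idxLin (endsFrom (t + PySem.Str.len l + 1) ls) x + 1 : Nat) : Int) + 1 := by
        push_cast; ring
      have h2 : (if idxLin (endsFrom (t + PySem.Str.len l + 1) ls) x + 1 = 0 then t
            else ((t + PySem.Str.len l + 1) :: endsFrom (t + PySem.Str.len l + 1) ls).getD
              (idxLin (endsFrom (t + PySem.Str.len l + 1) ls) x + 1 - 1) 0) =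
          (if idxLin (endsFrom (t + PySem.Str.len l + 1) ls) x = 0
            then t + PySem.Str.len l + 1
            else (endsFrom (t + PySem.Str.len l + 1) ls).getD
              (idxLin (endsFrom (t + PySem.Str.len l + 1) ls) x - 1) 0) := by
        cases hi : idxLin (endsFrom (t + PySem.Str.len l + 1) ls) x with
        | zero => simp
        | succ j => simp
      simp only [List.length_cons, Nat.add_lt_add_iff_right]
      rw [h2, ← h1]

-- ===== VERDICT (by name: the statement is the Claim_ definition above) =====
theorem abs_to_tk_index_py_spec : Claim_equal_abs_to_tk_index_py := by
  intro x lines _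
  unfold Spec_abs_to_tk_index_py abs_to_tk_index_py abs_to_tk_index_py_alt
  rw [foldl_ends lines [] 0]
  simp only [List.nil_append]
  rw [bsearch_eq_idxLin _ _ (endsFrom_sorted 0 lines)]
  have hx : x = x - 0 := by ring
  rw [show abs_to_tk_index_loopA lines x 0 = abs_to_tk_index_loopA lines (x - 0) 0 by rw [← hx],
    loopA_eq lines x 0 0]
  by_cases hlt : idxLin (endsFrom 0 lines) x < lines.length
  · rw [if_pos hlt, if_pos hlt]
    simp
  · rw [if_neg hlt, if_neg hlt]
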